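-- pv_equiv track=rewrite | github.com/Kkiriya/TP-Longest-Path-in-Matrix | every_version_of_my_algo/recursive_matrix_condensed.py | navigate_matrix
-- ===== SOURCE A (Python) =====
-- matrix = [
--     [9, 8, 7, 1],
--     [4, 5, 6, 2],
--     [3, 2, 1, 3]
-- ]
--
-- def navigate_matrix(direction="right", position=(0,0), path_length=0):
--     direction_to_position = {
--         "right": (0, 1), # will apply i+0, j+1
--         "left": (0, -1), # will apply i+0, j-1
--         "up": (-1, 0), # will apply i-1, j+0
--         "down": (1, 0), # will apply i+1, j+0
--     }
--
--     current_position = position # contains current position (mainly for clarity)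
--     next_position = (position[0] + direction_to_position[direction][0], position[1] + direction_to_position[direction][1]) # contains the next position to evaluate
--
--     try: # contains the current value of the position within the matrix and the next one
--         current_val = matrix[current_position[0]][current_position[1]]
--         next_val = matrix[next_position[0]][next_position[1]]
--
--     except IndexError:
--         return 0 # if we end up outside the matrix we stop moving in that direction
--
--     if current_val < next_val:
--         return 0 # if the next value is bigger we stop moving in that direction
--
--     else:
--         path_length += 1 # increase the path length by one upon succesful movement
--         return path_length + navigate_matrix(direction, next_position, path_length)
-- ===== SOURCE B (Python) =====
-- matrix = [
--     [9, 8, 7, 1],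
--     [4, 5, 6, 2],
--     [3, 2, 1, 3]
-- ]
--
-- def navigate_matrix(direction="right", position=(0,0), path_length=0):
--     direction_to_position = {
--         "right": (0, 1),
--         "left": (0, -1),
--         "up": (-1, 0),
--         "down": (1, 0),
--     }
--     di, dj = direction_to_position[direction]
--     i, j = position
--     n = 0
--     while True:
--         try:
--             current_val = matrix[i][j]
--             next_val = matrix[i + di][j + dj]
--         except IndexError:
--             break
--         if current_val < next_val:
--             break
--         n += 1
--         i += di
--         j += dj
--     return n * path_length + n * (n + 1) // 2
-- ===== Notes on version B (the rewrite author's own statement) =====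
-- stated objective: alternative
-- what changed: Replaced the recursion with a path_length accumulator by an iterative loop that only counts the number n of movable steps and then returns the closed form n*path_length + n*(n+1)//2.
import Mathlib
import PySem

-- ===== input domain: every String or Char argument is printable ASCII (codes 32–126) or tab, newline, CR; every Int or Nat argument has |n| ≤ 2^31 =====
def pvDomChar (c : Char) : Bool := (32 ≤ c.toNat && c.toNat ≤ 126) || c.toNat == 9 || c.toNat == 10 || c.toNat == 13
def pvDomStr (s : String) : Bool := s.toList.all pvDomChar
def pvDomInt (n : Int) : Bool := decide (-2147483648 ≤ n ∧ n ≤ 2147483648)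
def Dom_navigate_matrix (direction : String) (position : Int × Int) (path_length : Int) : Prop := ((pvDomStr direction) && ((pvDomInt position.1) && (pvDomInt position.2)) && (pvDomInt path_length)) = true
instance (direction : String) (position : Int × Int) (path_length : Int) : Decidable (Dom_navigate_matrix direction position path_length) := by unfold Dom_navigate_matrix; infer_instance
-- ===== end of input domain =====

-- B replaces A's recursion-with-accumulator by a counting loop plus the closed form
-- n*path_length + n*(n+1)//2 (objective: alternative decomposition, same cost).

-- ===== PORT A =====
-- the module-level matrix
def pvMat : List (List Int) := [[9, 8, 7, 1], [4, 5, 6, 2], [3, 2, 1, 3]]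

-- the direction_to_position dict literal (both Pythons build this same literal dict)
def pvDirs : PySem.Dict String (Int × Int) :=
  PySem.Dict.ofList [("right", (0, 1)), ("left", (0, -1)), ("up", (-1, 0)), ("down", (1, 0))]

-- matrix[i][j] with Python indexing; none = IndexError
def pvGet2 (i j : Int) : Option Int :=
  match PySem.List.pyGet? pvMat i with
  | none => none
  | some row => PySem.List.pyGet? row j

-- termination facts (stated before the ports because their decreasing_by cites them)
theorem pvDirs_get?_cases {direction : String} {d : Int × Int}
    (h : PySem.Dict.get? pvDirs direction = some d) :
    (direction = "right" ∧ d = (0, 1)) ∨ (direction = "left" ∧ d = (0, -1)) ∨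
    (direction = "up" ∧ d = (-1, 0)) ∨ (direction = "down" ∧ d = (1, 0)) := by
  simp only [pvDirs] at h
  simp [pysem] at h
  rw [show (PySem.Dict.ofList [("right", ((0:Int), (1:Int))), ("left", (0, -1)), ("up", (-1, 0)), ("down", (1, 0))]).items = [("right", ((0:Int), (1:Int))), ("left", (0, -1)), ("up", (-1, 0)), ("down", (1, 0))] from by decide] at h
  simp at h
  tauto

theorem pvDirs_contains_cases {direction : String}
    (h : PySem.Dict.contains pvDirs direction = true) :
    direction = "right" ∨ direction = "left" ∨ direction = "up" ∨ direction = "down" := by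
  simp [PySem.Dict.contains] at h
  obtain ⟨a, b, hm⟩ := h
  rw [show pvDirs.items = [("right", ((0:Int), (1:Int))), ("left", (0, -1)), ("up", (-1, 0)), ("down", (1, 0))] from by decide] at hm
  simp at hm
  tauto

-- bounds a successful matrix lookup forces on the index pair
theorem pvGet2_bounds {i j v : Int} (h : pvGet2 i j = some v) :
    -3 ≤ i ∧ i ≤ 2 ∧ -4 ≤ j ∧ j ≤ 3 := by
  unfold pvGet2 at h
  rcases hr : PySem.List.pyGet? pvMat i with _ | row
  · rw [hr] at h; exact absurd h (by simp)
  · rw [hr] at h; dsimp only at h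
    have hi : PySem.Raise.InRange pvMat.length i := by
      by_contra hc
      rw [(PySem.List.pyGet?_eq_none_iff _ _).2 hc] at hr; exact absurd hr (by simp)
    have hrow : row ∈ pvMat := PySem.List.mem_of_pyGet?_eq_some _ hr
    have hlen : row.length = 4 := by
      simp [pvMat] at hrow
      rcases hrow with h1 | h1 | h1 <;> subst h1 <;> rfl
    have hj : PySem.Raise.InRange row.length j := by
      by_contra hc
      rw [(PySem.List.pyGet?_eq_none_iff _ _).2 hc] at h; exact absurd h (by simp)
    simp [PySem.Raise.InRange, pvMat, hlen] at hi hj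
    omega

-- measure for the movement recursions, phrased on the step delta
def pvMD (di dj i j : Int) : Nat :=
  if dj = 1 then (4 - j).toNat
  else if dj = -1 then (j + 5).toNat
  else if di = -1 then (i + 4).toNat
  else (3 - i).toNat

def navigate_matrix (direction : String) (position : Int × Int) (path_length : Int) : Int :=
  match hdir : PySem.Dict.get? pvDirs direction with
  | none => 0  -- Python raises KeyError here; excluded by Pre_
  | some d =>
    match h1 : pvGet2 position.1 position.2,
          h2 : pvGet2 (position.1 + d.1) (position.2 + d.2) with
    | some current_val, some next_val =>
      if current_val < next_val then 0
      else (path_length + 1) +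
        navigate_matrix direction (position.1 + d.1, position.2 + d.2) (path_length + 1)
    | _, _ => 0  -- except IndexError: return 0
termination_by pvMD (PySem.Dict.getD pvDirs direction (0,0)).1 (PySem.Dict.getD pvDirs direction (0,0)).2 position.1 position.2
decreasing_by
  have hb := pvGet2_bounds h2
  have hgd : PySem.Dict.getD pvDirs direction (0,0) = d := by
    simp [PySem.Dict.getD, hdir]
  rcases pvDirs_get?_cases hdir with ⟨_, hd⟩ | ⟨_, hd⟩ | ⟨_, hd⟩ | ⟨_, hd⟩ <;>
    subst hd <;> simp [pvMD, hgd] at hb ⊢ <;> omega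

-- ===== PORT B =====
-- the while loop of Source B, counting movable steps; the Prop argument only justifies termination
def pvCountLoop (d : Int × Int) (i j n : Int)
    (hd : d = (0, 1) ∨ d = (0, -1) ∨ d = (-1, 0) ∨ d = (1, 0)) : Int :=
  match pvGet2 i j with
  | none => n  -- except IndexError: break
  | some current_val =>
    match h2 : pvGet2 (i + d.1) (j + d.2) with
    | none => n  -- except IndexError: break
    | some next_val =>
      if current_val < next_val then n
      else pvCountLoop d (i + d.1) (j + d.2) (n + 1) hd
termination_by pvMD d.1 d.2 i j
decreasing_by
  have hb := pvGet2_bounds h2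
  rcases hd with hd | hd | hd | hd <;>
    subst hd <;> simp [pvMD] at hb ⊢ <;> omega

def navigate_matrix_alt (direction : String) (position : Int × Int) (path_length : Int) : Int :=
  if hmem : PySem.Dict.contains pvDirs direction = true then
    let d := PySem.Dict.getD pvDirs direction (0, 0)
    let n := pvCountLoop d position.1 position.2 0 (by
      rcases pvDirs_contains_cases hmem with h | h | h | h <;> subst h <;> decide)
    n * path_length + PySem.Int.floordiv (n * (n + 1)) 2
  else 0  -- Python raises KeyError here; excluded by Pre_

-- ===== PRECONDITION & SPEC =====
-- Pre_ excludes direction strings other than the four dict keys: there A raises KeyError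
-- (and Source B raises KeyError too).
def Pre_navigate_matrix (direction : String) (position : Int × Int) (path_length : Int) : Prop :=
  direction = "right" ∨ direction = "left" ∨ direction = "up" ∨ direction = "down"
instance (direction : String) (position : Int × Int) (path_length : Int) : Decidable (Pre_navigate_matrix direction position path_length) := by unfold Pre_navigate_matrix; infer_instance

def pvWitness_navigate_matrix : String × (Int × Int) × Int := ("right", (0, 0), 0)

def Spec_navigate_matrix (direction : String) (position : Int × Int) (path_length : Int) (out : Int) : Prop := out = navigate_matrix_alt direction position path_length
instance (direction : String) (position : Int × Int) (path_length : Int) (out : Int) : Decidable (Spec_navigate_matrix direction position path_length out) := by unfold Spec_navigate_matrix; infer_instance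

-- ===== CLAIM (what is proved, stated in full; the proofs are below) =====
def Claim_equal_navigate_matrix : Prop := ∀ (direction : String) (position : Int × Int) (path_length : Int), Dom_navigate_matrix direction position path_length → Pre_navigate_matrix direction position path_length → Spec_navigate_matrix direction position path_length (navigate_matrix direction position path_length)

-- ===== LEMMAS AND PROOFS =====

-- one-step evaluation lemmas for the loop
theorem pvCountLoop_step {d : Int × Int} {i j cur nx : Int} (n : Int)
    (hd : d = (0, 1) ∨ d = (0, -1) ∨ d = (-1, 0) ∨ d = (1, 0))
    (h1 : pvGet2 i j = some cur) (h2 : pvGet2 (i + d.1) (j + d.2) = some nx)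
    (hlt : ¬ cur < nx) :
    pvCountLoop d i j n hd = pvCountLoop d (i + d.1) (j + d.2) (n + 1) hd := by
  conv_lhs => rw [pvCountLoop]
  split
  · next heq => simp_all
  · next cur' heq =>
    split
    · next h2' => simp_all
    · next nx' h2' => simp_all

theorem pvCountLoop_stop_lt {d : Int × Int} {i j cur nx : Int} (n : Int)
    (hd : d = (0, 1) ∨ d = (0, -1) ∨ d = (-1, 0) ∨ d = (1, 0))
    (h1 : pvGet2 i j = some cur) (h2 : pvGet2 (i + d.1) (j + d.2) = some nx)
    (hlt : cur < nx) :
    pvCountLoop d i j n hd = n := by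
  conv_lhs => rw [pvCountLoop]
  split
  · next heq => rfl
  · next cur' heq =>
    split
    · next h2' => rfl
    · next nx' h2' => simp_all

theorem pvCountLoop_stop_none {d : Int × Int} {i j : Int} (n : Int)
    (hd : d = (0, 1) ∨ d = (0, -1) ∨ d = (-1, 0) ∨ d = (1, 0))
    (h : pvGet2 i j = none ∨ pvGet2 (i + d.1) (j + d.2) = none) :
    pvCountLoop d i j n hd = n := by
  conv_lhs => rw [pvCountLoop]
  split
  · next heq => rfl
  · next cur' heq =>
    split
    · next h2' => rfl
    · next nx' h2' => rcases h with h | h <;> simp_all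

-- the loop's counter only shifts the result
theorem pvCountLoop_shift (d : Int × Int)
    (hd : d = (0, 1) ∨ d = (0, -1) ∨ d = (-1, 0) ∨ d = (1, 0)) :
    ∀ (k : Nat) (i j : Int), pvMD d.1 d.2 i j = k →
      ∀ n : Int, pvCountLoop d i j n hd = n + pvCountLoop d i j 0 hd := by
  intro k
  induction k using Nat.strong_induction_on with
  | _ k ih =>
    intro i j hk n
    conv_lhs => rw [pvCountLoop]
    conv_rhs => rw [pvCountLoop]
    split
    · next heq => simp
    · next cur heq =>
      split
      · next h2' => simp
      · next nx h2' =>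
        split_ifs with hlt
        · simp
        · have hb := pvGet2_bounds h2'
          have hlt' : pvMD d.1 d.2 (i + d.1) (j + d.2) < k := by
            subst hk
            rcases hd with hd | hd | hd | hd <;> subst hd <;> simp [pvMD] at hb ⊢ <;> try omega
          rw [ih _ hlt' _ _ rfl (n + 1), ih _ hlt' _ _ rfl (0 + 1)]
          ring

-- the closed form satisfies A's recurrence
theorem pvStepFormula (c p : Int) :
    (c + 1) * p + PySem.Int.floordiv ((c + 1) * ((c + 1) + 1)) 2
      = (p + 1) + (c * (p + 1) + PySem.Int.floordiv (c * (c + 1)) 2) := by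
  rw [PySem.Int.floordiv_eq_ediv_of_pos (by norm_num), PySem.Int.floordiv_eq_ediv_of_pos (by norm_num)]
  obtain ⟨k, hk⟩ := Int.even_mul_succ_self c
  have h2 : (c + 1) * ((c + 1) + 1) = c * (c + 1) + 2 * (c + 1) := by ring
  have h3 : c * (p + 1) = c * p + c := by ring
  have h4 : (c + 1) * p = c * p + p := by ring
  omega

-- A's recursion computed from the step count
theorem pvNav_eq_count :
    ∀ (k : Nat) (direction : String) (position : Int × Int) (path_length : Int)
      (d : Int × Int) (hdir : PySem.Dict.get? pvDirs direction = some d)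
      (hd : d = (0, 1) ∨ d = (0, -1) ∨ d = (-1, 0) ∨ d = (1, 0)),
      pvMD d.1 d.2 position.1 position.2 = k →
      navigate_matrix direction position path_length
        = (pvCountLoop d position.1 position.2 0 hd) * path_length
          + PySem.Int.floordiv ((pvCountLoop d position.1 position.2 0 hd)
              * ((pvCountLoop d position.1 position.2 0 hd) + 1)) 2 := by
  intro k
  induction k using Nat.strong_induction_on with
  | _ k ih =>
    intro direction position p d hdir hd hk
    conv_lhs => rw [navigate_matrix]
    split
    · next heq => rw [hdir] at heq; cases heq
    · next d' heq =>
      rw [hdir] at heq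
      obtain rfl : d = d' := by exact Option.some.inj heq
      split
      · next cur nx h1 h2 =>
        split
        · next hlt =>
          rw [pvCountLoop_stop_lt 0 hd h1 h2 hlt]
          simp [PySem.Int.floordiv]
        · next hlt =>
          have hb := pvGet2_bounds h2
          have hlt' : pvMD d.1 d.2 (position.1 + d.1) (position.2 + d.2) < k := by
            subst hk
            rcases hd with h | h | h | h <;> subst h <;> simp [pvMD] at hb ⊢ <;> try omega
          rw [ih _ hlt' direction (position.1 + d.1, position.2 + d.2) (p + 1) d hdir hd rfl]
          rw [pvCountLoop_step 0 hd h1 h2 hlt, pvCountLoop_shift d hd _ _ _ rfl (0 + 1)]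
          have := pvStepFormula (pvCountLoop d (position.1 + d.1) (position.2 + d.2) 0 hd) p
          ring_nf at this ⊢
          linarith [this]
      · next h =>
        have hnone : pvGet2 position.1 position.2 = none ∨
            pvGet2 (position.1 + d.1) (position.2 + d.2) = none := by
          rcases ha : pvGet2 position.1 position.2 with _ | cur
          · exact Or.inl rfl
          · rcases hb2 : pvGet2 (position.1 + d.1) (position.2 + d.2) with _ | nx
            · exact Or.inr rfl
            · exact (h cur nx ha hb2).elim
        rw [pvCountLoop_stop_none 0 hd hnone]
        simp [PySem.Int.floordiv]

-- ===== VERDICT (by name: the statement is the Claim_ definition above) =====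
theorem navigate_matrix_spec : Claim_equal_navigate_matrix := by
  intro direction position path_length _ hpre
  unfold Spec_navigate_matrix navigate_matrix_alt
  have hmem : PySem.Dict.contains pvDirs direction = true := by
    rcases hpre with rfl | rfl | rfl | rfl <;> decide
  rw [dif_pos hmem]
  have hdir : PySem.Dict.get? pvDirs direction
      = some (PySem.Dict.getD pvDirs direction (0, 0)) := by
    rcases hpre with rfl | rfl | rfl | rfl <;> decide
  exact pvNav_eq_count _ direction position path_length _ hdir _ rfl
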